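-- pv_equiv track=rewrite | github.com/leetjes123/EVDASHLarge | ocm.py | get_charger_type
-- ===== SOURCE A (Python) =====
-- def get_charger_type(connections):
--         ac = False
--         dc = False
--         for connection in connections:
--             currentId = connection.get('CurrentTypeID')
--             if currentId is not None:
--                 if currentId < 30:
--                     ac = True
--                 elif currentId == 30:
--                     dc = True
--                 if ac and dc:
--                     return 'AC/DC'
--         if ac:
--             return 'AC'
--         elif dc:
--             return 'DC'
--         return 'AC'
-- ===== SOURCE B (Python) =====
-- def get_charger_type(connections):
--     ac = any(c.get('CurrentTypeID') is not None and c.get('CurrentTypeID') < 30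
--              for c in connections)
--     dc = any(c.get('CurrentTypeID') == 30 for c in connections)
--     if ac and dc:
--         return 'AC/DC'
--     if ac:
--         return 'AC'
--     if dc:
--         return 'DC'
--     return 'AC'
-- ===== Notes on version B (the rewrite author's own statement) =====
-- stated objective: idiomatic
-- what changed: Replaces the single interleaved two-flag accumulator loop with early return by two independent short-circuiting any() existence scans (one for AC, one for DC) followed by a flat decision chain.
import Mathlib
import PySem

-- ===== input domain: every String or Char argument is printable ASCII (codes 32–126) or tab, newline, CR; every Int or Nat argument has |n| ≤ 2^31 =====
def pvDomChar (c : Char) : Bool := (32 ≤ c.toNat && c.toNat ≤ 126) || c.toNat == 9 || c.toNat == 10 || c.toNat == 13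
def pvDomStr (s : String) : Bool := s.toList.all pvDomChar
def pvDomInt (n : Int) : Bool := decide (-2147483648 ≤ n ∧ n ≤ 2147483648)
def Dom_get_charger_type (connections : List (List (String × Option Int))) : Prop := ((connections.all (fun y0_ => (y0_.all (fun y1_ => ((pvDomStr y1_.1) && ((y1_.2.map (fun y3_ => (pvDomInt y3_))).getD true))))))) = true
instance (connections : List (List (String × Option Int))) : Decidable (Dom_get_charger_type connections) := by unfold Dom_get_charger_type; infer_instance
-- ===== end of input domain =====

-- B replaces A's single interleaved two-flag loop (with early return) by two
-- independent short-circuiting existence scans; return values agree on all inputs.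

-- ===== PORT A =====
-- the for-loop of A, carrying the two flags; the final if-chain is the base case
def chargerLoopA : List (List (String × Option Int)) → Bool → Bool → String
  | [], ac, dc => if ac then "AC" else if dc then "DC" else "AC"
  | c :: rest, ac, dc =>
      match ((PySem.Dict.mk c).get? "CurrentTypeID").join with
      | none => chargerLoopA rest ac dc
      | some v =>
          let ac' := if v < 30 then true else ac
          let dc' := if v < 30 then dc else if v = 30 then true else dc
          if ac' && dc' then "AC/DC" else chargerLoopA rest ac' dc'

def get_charger_type (connections : List (List (String × Option Int))) : String :=
  chargerLoopA connections false false

-- ===== PORT B =====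
def get_charger_type_alt (connections : List (List (String × Option Int))) : String :=
  let ac := connections.any (fun c =>
    match ((PySem.Dict.mk c).get? "CurrentTypeID").join with
    | none => false
    | some v => decide (v < 30))
  let dc := connections.any (fun c =>
    ((PySem.Dict.mk c).get? "CurrentTypeID").join == some (30 : Int))
  if ac && dc then "AC/DC" else if ac then "AC" else if dc then "DC" else "AC"

-- ===== PRECONDITION & SPEC =====
def Spec_get_charger_type (connections : List (List (String × Option Int))) (out : String) : Prop := out = get_charger_type_alt connections
instance (connections : List (List (String × Option Int))) (out : String) : Decidable (Spec_get_charger_type connections out) := by unfold Spec_get_charger_type; infer_instance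

-- ===== CLAIM (what is proved, stated in full; the proofs are below) =====
def Claim_equal_get_charger_type : Prop := ∀ (connections : List (List (String × Option Int))), Dom_get_charger_type connections → Spec_get_charger_type connections (get_charger_type connections)

-- ===== LEMMAS AND PROOFS =====

-- ===== VERDICT (by name: the statement is the Claim_ definition above) =====
-- B's final decision chain on two flags
def finalStr (ac dc : Bool) : String :=
  if ac && dc then "AC/DC" else if ac then "AC" else if dc then "DC" else "AC"

def acPred (c : List (String × Option Int)) : Bool :=
  match ((PySem.Dict.mk c).get? "CurrentTypeID").join with
  | none => false
  | some v => decide (v < 30)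

def dcPred (c : List (String × Option Int)) : Bool :=
  ((PySem.Dict.mk c).get? "CurrentTypeID").join == some (30 : Int)

theorem chargerLoopA_eq (l : List (List (String × Option Int))) :
    ∀ ac dc : Bool, (ac && dc) = false →
      chargerLoopA l ac dc = finalStr (ac || l.any acPred) (dc || l.any dcPred) := by
  induction l with
  | nil =>
      intro ac dc h
      cases ac <;> cases dc <;> simp_all [chargerLoopA, finalStr]
  | cons c rest ih =>
      intro ac dc h
      simp only [chargerLoopA, List.any_cons, acPred, dcPred]
      cases hj : ((PySem.Dict.mk c).get? "CurrentTypeID").join with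
      | none => simpa using ih ac dc h
      | some v =>
          by_cases hlt : v < 30
          · by_cases h30 : v = 30
            · omega
            · have hbe : (v == (30:Int)) = false := by simp [h30]
              cases dc
              · simpa [hlt, hbe] using ih true false rfl
              · cases ac <;> simp [hlt, hbe, finalStr]
          · by_cases h30 : v = 30
            · cases ac
              · simpa [hlt, h30] using ih false true rfl
              · cases dc <;> simp [h30, finalStr]
            · have hbe : (v == (30:Int)) = false := by simp [h30]
              simpa [hlt, h30, hbe, h] using ih ac dc h

theorem get_charger_type_spec : Claim_equal_get_charger_type := by
  intro connections _
  show get_charger_type connections = get_charger_type_alt connections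
  have := chargerLoopA_eq connections false false rfl
  simpa [get_charger_type, get_charger_type_alt, finalStr, acPred, dcPred] using this
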